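-- pv_equiv track=rewrite | github.com/chanduthedev/python_programs | round_robin.py | find_round_robin_str
-- ===== SOURCE A (Python) =====
-- def find_round_robin_str(str_list: list) -> str:
--     # empty check
--     if not str_list:
--         return ""
--     # Get max string length from the list of strings
--     max_len = max([len(char) for char in str_list])
--
--     # to store letters in round robin order
--     final_list = []
--     # repeat until max string length times
--     for i in range(max_len):
--         for string in str_list:
--             if len(string) > i:
--                 final_list.append(string[i])
--     return "".join(final_list)
-- ===== SOURCE B (Python) =====
-- def find_round_robin_str(str_list: list) -> str:
--     # One pass over the characters: bucket each char into its column list, then flatten.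
--     cols = []
--     for s in str_list:
--         for i, ch in enumerate(s):
--             if i < len(cols):
--                 cols[i].append(ch)
--             else:
--                 cols.append([ch])
--     return "".join("".join(col) for col in cols)
-- ===== Notes on version B (the rewrite author's own statement) =====
-- stated objective: alternative
-- what changed: A scans the whole string list once per column index up to the maximum length; B makes a single pass over the strings' characters, bucketing each char into its column list, and flattens the buckets.
import Mathlib
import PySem

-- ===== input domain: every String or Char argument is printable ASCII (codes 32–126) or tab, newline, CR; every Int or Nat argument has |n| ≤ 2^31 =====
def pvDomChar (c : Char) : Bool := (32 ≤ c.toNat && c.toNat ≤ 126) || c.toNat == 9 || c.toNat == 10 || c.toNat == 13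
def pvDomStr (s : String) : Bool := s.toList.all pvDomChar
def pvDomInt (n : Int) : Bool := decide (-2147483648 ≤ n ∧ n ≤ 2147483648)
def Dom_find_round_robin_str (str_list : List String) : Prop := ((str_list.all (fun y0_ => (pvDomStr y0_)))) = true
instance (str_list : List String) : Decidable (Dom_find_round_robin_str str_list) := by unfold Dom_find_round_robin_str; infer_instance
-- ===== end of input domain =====

-- B replaces A's column-by-column rescan of the whole string list by a single pass over the
-- characters that buckets each char into its column list and flattens the buckets (alternative
-- traversal order; same result).

-- ===== PORT A =====
-- "".join of a list of single characters is String.ofList; string[i] is exact here because it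
-- is guarded by len(string) > i, so pyGetD's default is never used.
def find_round_robin_str (str_list : List String) : String :=
  if str_list = [] then ""
  else
    let max_len : Int :=
      (PySem.List.max? (str_list.map (fun char => PySem.Str.len char)) (fun x => x)).getD 0
    let final_list : List Char :=
      (PySem.List.pyRange 0 max_len 1).foldl (fun acc i =>
        str_list.foldl (fun acc string =>
          if i < PySem.Str.len string then acc ++ [PySem.List.pyGetD string.toList i ' '] else acc)
          acc) []
    String.ofList final_list

-- ===== PORT B =====
-- one enumerate step of Source B's inner loop: put ch into bucket i (append a new bucket at the end
-- exactly when i == len(cols), which is the only way i can exceed the current bucket count)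
def pvColStep (cols : List (List Char)) (p : Int × Char) : List (List Char) :=
  if p.1 < PySem.List.len cols then
    PySem.List.pySetD cols p.1 (PySem.List.pyGetD cols p.1 [] ++ [p.2])
  else cols ++ [[p.2]]

def find_round_robin_str_alt (str_list : List String) : String :=
  let cols : List (List Char) :=
    str_list.foldl (fun cols s => (PySem.List.enumerate s.toList 0).foldl pvColStep cols) []
  PySem.Str.join "" (cols.map (fun col => String.ofList col))

-- ===== PRECONDITION & SPEC =====
def Spec_find_round_robin_str (str_list : List String) (out : String) : Prop := out = find_round_robin_str_alt str_list
instance (str_list : List String) (out : String) : Decidable (Spec_find_round_robin_str str_list out) := by unfold Spec_find_round_robin_str; infer_instance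

-- ===== CLAIM (what is proved, stated in full; the proofs are below) =====
def Claim_equal_find_round_robin_str : Prop := ∀ (str_list : List String), Dom_find_round_robin_str str_list → Spec_find_round_robin_str str_list (find_round_robin_str str_list)

-- ===== LEMMAS AND PROOFS =====

-- column j of the round-robin result: the j-th character of every string long enough, in list order
def pvCol (L : List String) (j : Nat) : List Char := L.filterMap (fun s => s.toList[j]?)

-- the running maximum of the string lengths, as A's max and B's bucket count both compute it
def pvMax (L : List String) : Nat := L.foldl (fun m s => max m s.toList.length) 0

theorem pvMax_append (L : List String) (s : String) :
    pvMax (L ++ [s]) = max (pvMax L) s.toList.length := by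
  simp [pvMax, List.foldl_append]

theorem pvLen_le_pvMax (L : List String) (s : String) (h : s ∈ L) :
    s.toList.length ≤ pvMax L :=
  (PySem.List.le_foldl_max_nat L (fun s => s.toList.length) 0).2 s h

theorem pvCol_eq_nil (L : List String) (j : Nat) (h : pvMax L ≤ j) : pvCol L j = [] := by
  rw [pvCol, List.filterMap_eq_nil_iff]
  intro s hs
  have h2 := pvLen_le_pvMax L s hs
  rw [List.getElem?_eq_none_iff]
  omega

theorem pvCol_append (L : List String) (s : String) (j : Nat) :
    pvCol (L ++ [s]) j = pvCol L j ++ (s.toList[j]?).toList := by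
  cases h : s.toList[j]? <;>
    simp [pvCol, List.filterMap_append, h]

-- A's inner loop over the strings produces exactly column i
theorem pvA_inner (i : Nat) (L : List String) (acc : List Char) :
    L.foldl (fun acc string =>
      if (i : Int) < PySem.Str.len string then acc ++ [PySem.List.pyGetD string.toList (i : Int) ' ']
      else acc) acc = acc ++ pvCol L i := by
  induction L generalizing acc with
  | nil => simp [pvCol]
  | cons s t ih =>
    rw [List.foldl_cons, ih]
    by_cases h : i < s.toList.length
    · rw [if_pos (by rw [PySem.Str.len_eq]; exact_mod_cast h)]
      simp [pvCol, List.getElem?_eq_getElem h, List.getD]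
    · rw [if_neg (by rw [PySem.Str.len_eq]; exact_mod_cast h)]
      have hn : s.toList[i]? = none := List.getElem?_eq_none_iff.2 (by omega)
      simp [pvCol, hn]

-- A's Int running max over the lengths is pvMax, cast
theorem pvMax_int (t : List String) (a : Nat) :
    (t.map (fun c => PySem.Str.len c)).foldl max ((a : Nat) : Int) =
      ((t.foldl (fun m s => max m s.toList.length) a : Nat) : Int) := by
  induction t generalizing a with
  | nil => simp
  | cons s u ih =>
    simp only [List.map_cons, List.foldl_cons, PySem.Str.len_eq]
    rw [show max ((a : Nat) : Int) ((s.toList.length : Nat) : Int)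
          = (((max a s.toList.length : Nat)) : Int) by simp [Nat.cast_max]]
    exact ih _

-- A's outer loop over range(max_len) concatenates the columns
theorem pvA_outer (L : List String) (M : Nat) (acc : List Char) :
    (PySem.List.pyRange 0 (M : Int) 1).foldl (fun acc i =>
      L.foldl (fun acc string =>
        if i < PySem.Str.len string then acc ++ [PySem.List.pyGetD string.toList i ' '] else acc)
        acc) acc
      = acc ++ (List.range M).flatMap (pvCol L) := by
  induction M generalizing acc with
  | zero =>
    rw [PySem.List.pyRange_one_eq_nil (by norm_num)]
    simp
  | succ m ih =>
    rw [show ((m + 1 : Nat) : Int) = ((m : Nat) : Int) + 1 by push_cast; ring]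
    rw [PySem.List.pyRange_one_succ_right (by positivity), List.foldl_append, ih]
    simp only [List.foldl_cons, List.foldl_nil]
    rw [pvA_inner m L]
    rw [List.range_succ, List.flatMap_append]
    simp

-- what A computes on a nonempty list
theorem pvA_eq (L : List String) (h : L ≠ []) :
    find_round_robin_str L = String.ofList ((List.range (pvMax L)).flatMap (pvCol L)) := by
  obtain ⟨s, t, rfl⟩ : ∃ s t, L = s :: t := by
    cases L with | nil => exact absurd rfl h | cons s t => exact ⟨s, t, rfl⟩
  rw [find_round_robin_str]
  simp only [if_neg (by simp : ¬ (s :: t = []))]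
  have hmax : (PySem.List.max? ((s :: t).map (fun c => PySem.Str.len c)) (fun x => x)).getD 0
      = ((pvMax (s :: t) : Nat) : Int) := by
    rw [List.map_cons, PySem.List.max?_id_cons, Option.getD_some, PySem.Str.len_eq, pvMax_int]
    norm_num [pvMax]
  rw [hmax, pvA_outer (s :: t) (pvMax (s :: t)) []]
  simp

-- setting index t of a range-map is a pointwise update of the function
theorem pvSet_range_map (n t : Nat) (g : Nat → List Char) (v : List Char) :
    ((List.range n).map g).set t v = (List.range n).map (fun j => if j = t then v else g j) := by
  apply List.ext_getElem (by simp)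
  intro j h1 h2
  simp only [List.getElem_set, List.getElem_map, List.getElem_range]
  by_cases hj : t = j
  · subst hj; simp
  · rw [if_neg hj, if_neg (Ne.symm hj)]
theorem pvFoldEnum (cs : List Char) : ∀ (t n : Nat) (g : Nat → List Char), t ≤ n →
    (PySem.List.enumerate cs (t : Int)).foldl pvColStep ((List.range n).map g) =
      (List.range (max n (t + cs.length))).map (fun j =>
        if t ≤ j ∧ j < t + cs.length then (if j < n then g j else []) ++ [cs.getD (j - t) ' ']
        else g j) := by
  induction cs with
  | nil =>
    intro t n g ht
    simp only [PySem.List.enumerate_nil, List.foldl_nil, List.length_nil, Nat.add_zero,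
      Nat.max_eq_left ht]
    apply List.map_congr_left
    intro j _
    simp only [if_neg (by omega : ¬ (t ≤ j ∧ j < t))]
  | cons c cs ih =>
    intro t n g ht
    rw [PySem.List.enumerate_cons, List.foldl_cons]
    by_cases hlt : t < n
    · have hstep : pvColStep ((List.range n).map g) ((t : Int), c)
          = (List.range n).map (fun j => if j = t then g t ++ [c] else g j) := by
        rw [pvColStep]
        simp only [PySem.List.len_eq, List.length_map, List.length_range]
        rw [if_pos (by exact_mod_cast hlt)]
        rw [PySem.List.pySetD_natCast, PySem.List.pyGetD_natCast]
        rw [pvSet_range_map]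
        congr 1
        funext j
        congr 1
        simp [List.getD, List.getElem?_map, List.getElem?_range hlt]
      rw [hstep]
      have h1 : ((t : Int)) + 1 = (((t + 1 : Nat) : Int)) := by push_cast; ring
      rw [h1, ih (t + 1) n (fun j => if j = t then g t ++ [c] else g j) (by omega)]
      have hmax : max n (t + 1 + cs.length) = max n (t + (c :: cs).length) := by
        simp only [List.length_cons]; omega
      rw [hmax]
      apply List.map_congr_left
      intro j hj
      simp only [List.mem_range, List.length_cons] at hj ⊢
      rcases Nat.lt_trichotomy j t with hc | rfl | hc
      · rw [if_neg (by omega), if_neg (by omega), if_neg (by omega)]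
      · rw [if_neg (by omega), if_pos rfl, if_pos (by omega), if_pos hlt]
        simp [List.getD]
      · by_cases hin : j < t + 1 + cs.length
        · have hd : j - t = (j - (t + 1)) + 1 := by omega
          by_cases hn : j < n
          · rw [if_pos (by omega), if_pos hn, if_neg (by omega), if_pos (by omega), if_pos hn, hd]
            simp [List.getD]
          · rw [if_pos (by omega), if_neg hn, if_pos (by omega), if_neg hn, hd]
            simp [List.getD]
        · rw [if_neg (by omega), if_neg (by omega), if_neg (by omega)]
    · have htn : t = n := by omega
      subst htn
      have hstep : pvColStep ((List.range t).map g) ((t : Int), c)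
          = (List.range (t + 1)).map (fun j => if j = t then [c] else g j) := by
        rw [pvColStep]
        simp only [PySem.List.len_eq, List.length_map, List.length_range]
        rw [if_neg (by omega)]
        rw [List.range_succ, List.map_append]
        simp only [List.map_cons, List.map_nil]
        congr 1
        apply List.map_congr_left
        intro j hj
        simp only [List.mem_range] at hj
        rw [if_neg (by omega)]
      rw [hstep]
      have h1 : ((t : Int)) + 1 = (((t + 1 : Nat) : Int)) := by push_cast; ring
      rw [h1, ih (t + 1) (t + 1) (fun j => if j = t then [c] else g j) (by omega)]
      have hmax : max (t + 1) (t + 1 + cs.length) = max t (t + (c :: cs).length) := by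
        simp only [List.length_cons]; omega
      rw [hmax]
      apply List.map_congr_left
      intro j hj
      simp only [List.mem_range, List.length_cons] at hj ⊢
      rcases Nat.lt_trichotomy j t with hc | rfl | hc
      · rw [if_neg (by omega), if_neg (by omega), if_neg (by omega)]
      · rw [if_neg (by omega), if_pos rfl, if_pos (by omega), if_neg (by omega)]
        simp [List.getD]
      · by_cases hin : j < t + 1 + cs.length
        · have hd : j - t = (j - (t + 1)) + 1 := by omega
          rw [if_pos (by omega), if_neg (by omega), if_pos (by omega), if_neg (by omega), hd]
          simp [List.getD]
        · rw [if_neg (by omega), if_neg (by omega), if_neg (by omega)]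

-- B's bucket state after the whole list: one bucket per column, holding exactly that column
theorem pvB_cols (L : List String) :
    L.foldl (fun cols s => (PySem.List.enumerate s.toList 0).foldl pvColStep cols) []
      = (List.range (pvMax L)).map (pvCol L) := by
  induction L using List.reverseRecOn with
  | nil => simp [pvMax]
  | append_singleton L s ih =>
    rw [List.foldl_append, List.foldl_cons, List.foldl_nil, ih]
    have h0 : ((0 : Int)) = (((0 : Nat) : Int)) := by norm_num
    rw [h0, pvFoldEnum s.toList 0 (pvMax L) (pvCol L) (by omega)]
    rw [pvMax_append]
    simp only [Nat.zero_add, Nat.zero_le]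
    apply List.map_congr_left
    intro j hj
    simp only [List.mem_range] at hj
    by_cases hjs : j < s.toList.length
    · rw [if_pos (show True ∧ j < s.toList.length from ⟨trivial, hjs⟩), pvCol_append]
      rw [List.getElem?_eq_getElem hjs]
      simp only [Nat.sub_zero]
      by_cases hjm : j < pvMax L
      · rw [if_pos hjm]
        simp [List.getD, List.getElem?_eq_getElem hjs]
      · rw [if_neg hjm, pvCol_eq_nil L j (by omega)]
        simp [List.getD, List.getElem?_eq_getElem hjs]
    · rw [if_neg (show ¬ (True ∧ j < s.toList.length) from fun hh => hjs hh.2), pvCol_append,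
        List.getElem?_eq_none_iff.2 (by omega)]
      simp

-- "".join over per-column strings is the flattened character list
theorem pvJoin_flatten (cols : List (List Char)) :
    PySem.Str.join "" (cols.map (fun col => String.ofList col)) = String.ofList cols.flatten := by
  apply String.toList_injective
  rw [PySem.Str.toList_join]
  have : ∀ (l : List (List Char)), ([] : List Char).intercalate l = l.flatten := by
    intro l
    induction l with
    | nil => simp [List.intercalate]
    | cons c t ih =>
      cases t with
      | nil => simp [List.intercalate]
      | cons d u =>
        simp [List.intercalate] at ih ⊢
        simpa using ih
  simp [PySem.Chars.join, this, Function.comp_def]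

-- ===== VERDICT (by name: the statement is the Claim_ definition above) =====
theorem find_round_robin_str_spec : Claim_equal_find_round_robin_str := by
  intro L _
  show find_round_robin_str L = find_round_robin_str_alt L
  by_cases h : L = []
  · subst h; rfl
  · rw [pvA_eq L h, find_round_robin_str_alt]
    simp only [pvB_cols]
    rw [pvJoin_flatten, ← List.flatMap_def]
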